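-- pv_equiv track=rewrite | github.com/antoniolago/vaultwarden-kubernetes-secrets | scripts/mock-k8s-server.py | _extract_ns_and_secret
-- ===== SOURCE A (Python) =====
-- def _extract_ns_and_secret(path: str):
--     """Parse /api/v1/namespaces/{ns}/secrets/{name}"""
--     parts = [p for p in path.rstrip("/").split("/") if p]
--     ns = None
--     secret_name = None
--     try:
--         # Look for .../namespaces/{ns}/secrets/{name}
--         for i, p in enumerate(parts):
--             if p == "namespaces" and i + 1 < len(parts):
--                 ns = parts[i + 1]
--             if p == "secrets" and i + 1 < len(parts):
--                 secret_name = parts[i + 1]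
--     except (IndexError, ValueError):
--         pass
--     return ns, secret_name
-- ===== SOURCE B (Python) =====
-- def _extract_ns_and_secret(path: str):
--     """Parse /api/v1/namespaces/{ns}/secrets/{name}"""
--     parts = [p for p in path.rstrip("/").split("/") if p]
--     succ = {seg: parts[i + 1] for i, seg in enumerate(parts[:-1])}
--     return succ.get("namespaces"), succ.get("secrets")
-- ===== Notes on version B (the rewrite author's own statement) =====
-- stated objective: idiomatic
-- what changed: Replaces A's indexed scan with two mutable variables and guarded parts[i+1] lookups by building a successor dictionary over parts[:-1] in one dict comprehension (last occurrence wins via overwrite) and returning succ.get('namespaces'), succ.get('secrets').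
import Mathlib
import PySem

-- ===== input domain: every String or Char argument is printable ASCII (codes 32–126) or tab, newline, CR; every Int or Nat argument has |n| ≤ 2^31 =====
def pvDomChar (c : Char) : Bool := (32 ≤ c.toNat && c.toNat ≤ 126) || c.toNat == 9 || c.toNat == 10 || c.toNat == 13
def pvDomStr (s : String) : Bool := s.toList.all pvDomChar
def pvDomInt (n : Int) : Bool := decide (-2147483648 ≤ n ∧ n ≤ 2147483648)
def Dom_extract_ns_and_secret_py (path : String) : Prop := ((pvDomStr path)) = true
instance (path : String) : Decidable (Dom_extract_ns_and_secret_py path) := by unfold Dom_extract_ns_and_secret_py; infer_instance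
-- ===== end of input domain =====

-- B replaces A's indexed scan that tracks two mutable variables by a one-pass successor
-- dictionary over parts[:-1] queried for the two keys (idiomatic; same O(n) cost).

-- ===== PORT A =====
-- hand port of path.rstrip("/"): drop trailing '/' characters (exact: rstrip with an
-- explicit chars argument removes exactly the trailing characters in that set)
def rstripSlash (s : String) : String :=
  String.ofList ((s.toList.reverse.dropWhile (fun c => c == '/')).reverse)

-- parts = [p for p in path.rstrip("/").split("/") if p]; split? is some since sep "/" ≠ ""
def partsOfPath (path : String) : List String :=
  ((PySem.Str.split? (rstripSlash path) "/").getD []).filter (fun p => !(p == ""))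

-- the loop body: both ifs guarded by i + 1 < len(parts); parts[i+1] is in range there,
-- so pyGetD with a dummy default is exact (the try/except in A is unreachable)
def aLoopStep (parts : List String) (st : Option String × Option String)
    (ip : Int × String) : Option String × Option String :=
  let st1 := if ip.2 = "namespaces" ∧ ip.1 + 1 < (parts.length : Int) then
      (some (PySem.List.pyGetD parts (ip.1 + 1) ""), st.2) else st
  if ip.2 = "secrets" ∧ ip.1 + 1 < (parts.length : Int) then
      (st1.1, some (PySem.List.pyGetD parts (ip.1 + 1) "")) else st1

def extract_ns_and_secret_py (path : String) : Option String × Option String :=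
  let parts := partsOfPath path
  (PySem.List.enumerate parts).foldl (aLoopStep parts) (none, none)

-- ===== PORT B =====
-- succ = {seg: parts[i+1] for i, seg in enumerate(parts[:-1])}; parts[i+1] in range, pyGetD exact
def extract_ns_and_secret_py_alt (path : String) : Option String × Option String :=
  let parts := partsOfPath path
  let succ := (PySem.List.enumerate (PySem.List.slice parts none (some (-1)))).foldl
      (fun (d : PySem.Dict String String) ip =>
        d.insert ip.2 (PySem.List.pyGetD parts (ip.1 + 1) "")) PySem.Dict.empty
  (succ.get? "namespaces", succ.get? "secrets")

-- ===== PRECONDITION & SPEC =====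
def Spec_extract_ns_and_secret_py (path : String) (out : Option String × Option String) : Prop := out = extract_ns_and_secret_py_alt path
instance (path : String) (out : Option String × Option String) : Decidable (Spec_extract_ns_and_secret_py path out) := by unfold Spec_extract_ns_and_secret_py; infer_instance

-- ===== CLAIM (what is proved, stated in full; the proofs are below) =====
def Claim_equal_extract_ns_and_secret_py : Prop := ∀ (path : String), Dom_extract_ns_and_secret_py path → Spec_extract_ns_and_secret_py path (extract_ns_and_secret_py path)

-- ===== LEMMAS AND PROOFS =====

-- A's enumerate-and-index loop is a left fold over the successor pairs zip L L.tail
lemma aFold_eq_zipFold (L : List String) : ∀ (l : List String) (s : Nat), l = L.drop s →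
    ∀ (st : Option String × Option String),
    (PySem.List.enumerate l (s : Int)).foldl (aLoopStep L) st
      = ((L.zip L.tail).drop s).foldl (fun a p =>
          (if p.1 = "namespaces" then some p.2 else a.1,
           if p.1 = "secrets" then some p.2 else a.2)) st := by
  intro l
  induction l with
  | nil =>
    intro s hl st
    have hlen : L.length ≤ s := List.drop_eq_nil_iff.mp hl.symm
    have hz : (L.zip L.tail).drop s = [] := by
      apply List.drop_eq_nil_iff.mpr
      rw [List.length_zip, List.length_tail]; omega
    simp [PySem.List.enumerate_nil, hz]
  | cons x xs ih =>
    intro s hl st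
    have hx : L[s]? = some x := by
      have : (L.drop s)[0]? = some x := by rw [← hl]; rfl
      simpa using this
    obtain ⟨hs, hxe⟩ := List.getElem?_eq_some_iff.mp hx
    have hxs : xs = L.drop (s + 1) := by
      have h2 : xs = (L.drop s).tail := by rw [← hl]; rfl
      rw [List.tail_drop] at h2; exact h2
    rw [PySem.List.enumerate_cons, List.foldl_cons]
    cases hxs2 : xs with
    | nil =>
      -- last element: both guards false, and no pair remains
      have hlen : L.length ≤ s + 1 := List.drop_eq_nil_iff.mp (hxs2 ▸ hxs).symm
      have hzip : (L.zip L.tail).drop s = [] := by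
        apply List.drop_eq_nil_iff.mpr
        rw [List.length_zip, List.length_tail]; omega
      have hstep : aLoopStep L st ((s : Int), x) = st := by
        unfold aLoopStep
        have hg : ¬ ((s : Int) + 1 < (L.length : Int)) := by push_cast; omega
        simp [hg]
      rw [hstep, hzip]
      rfl
    | cons y ys =>
      have hy : L[s+1]? = some y := by
        have : (L.drop (s+1))[0]? = some y := by rw [← hxs, hxs2]; rfl
        simpa using this
      obtain ⟨hs1, hye⟩ := List.getElem?_eq_some_iff.mp hy
      -- the pair list drops to (x, y) :: rest
      have hzlen : s < (L.zip L.tail).length := by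
        rw [List.length_zip, List.length_tail]; omega
      have hzget : (L.zip L.tail)[s]'hzlen = (x, y) := by
        have h2 : L.tail[s]'(by rw [List.length_tail]; omega) = y := by
          rw [List.getElem_tail]; exact hye
        simp [List.getElem_zip, hxe, h2]
      have hzip : (L.zip L.tail).drop s = (x, y) :: (L.zip L.tail).drop (s + 1) := by
        rw [List.drop_eq_getElem_cons hzlen, hzget]
      have hval : PySem.List.pyGetD L ((s : Int) + 1) "" = y := by
        have hc : ((s : Int) + 1) = ((s + 1 : Nat) : Int) := by push_cast; ring
        rw [hc, PySem.List.pyGetD_natCast]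
        simp [List.getD, hy]
      have hg : ((s : Int) + 1 < (L.length : Int)) := by push_cast; omega
      have hstep : aLoopStep L st ((s : Int), x)
          = (if x = "namespaces" then some y else st.1,
             if x = "secrets" then some y else st.2) := by
        unfold aLoopStep
        simp only [hval, hg, and_true]
        by_cases h1 : x = "namespaces"
        · have h2 : ¬ (x = "secrets") := by rw [h1]; decide
          simp [h1]
        · by_cases h2 : x = "secrets" <;> simp [h1, h2]
      rw [hstep, hzip, List.foldl_cons]
      have hc : ((s : Int) + 1) = ((s + 1 : Nat) : Int) := by push_cast; ring
      rw [hc, ← hxs2]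
      simpa using ih (s + 1) hxs _

-- parts[:-1] is dropLast
lemma slice_neg_one (l : List String) : PySem.List.slice l none (some (-1)) = l.dropLast := by
  cases l with
  | nil => rfl
  | cons x xs =>
    simp [PySem.List.slice, PySem.List.clampIdx, List.dropLast_eq_take]
    split_ifs <;> omega

-- B's dict-comprehension loop is the insert fold over the same successor pairs
lemma bFold_eq_zipFold (L : List String) : ∀ (l : List String) (s : Nat), l = L.dropLast.drop s →
    ∀ (d : PySem.Dict String String),
    (PySem.List.enumerate l (s : Int)).foldl
        (fun d ip => d.insert ip.2 (PySem.List.pyGetD L (ip.1 + 1) "")) d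
      = ((L.zip L.tail).drop s).foldl (fun d p => d.insert p.1 p.2) d := by
  intro l
  induction l with
  | nil =>
    intro s hl d
    have hlen : L.dropLast.length ≤ s := List.drop_eq_nil_iff.mp hl.symm
    have hz : (L.zip L.tail).drop s = [] := by
      apply List.drop_eq_nil_iff.mpr
      rw [List.length_zip, List.length_tail]
      rw [List.length_dropLast] at hlen; omega
    simp [PySem.List.enumerate_nil, hz]
  | cons x xs ih =>
    intro s hl d
    have hx : L.dropLast[s]? = some x := by
      have : (L.dropLast.drop s)[0]? = some x := by rw [← hl]; rfl
      simpa using this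
    obtain ⟨hs, hxe⟩ := List.getElem?_eq_some_iff.mp hx
    have hxs : xs = L.dropLast.drop (s + 1) := by
      have h2 : xs = (L.dropLast.drop s).tail := by rw [← hl]; rfl
      rw [List.tail_drop] at h2; exact h2
    have hs1 : s + 1 < L.length := by
      rw [List.length_dropLast] at hs; omega
    have hxeL : L[s]'(by omega) = x := by
      rw [← List.getElem_dropLast hs]; exact hxe
    have hzlen : s < (L.zip L.tail).length := by
      rw [List.length_zip, List.length_tail]; omega
    have hzget : (L.zip L.tail)[s]'hzlen = (x, L[s+1]'hs1) := by
      have h2 : L.tail[s]'(by rw [List.length_tail]; omega) = L[s+1]'hs1 := by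
        rw [List.getElem_tail]
      simp [List.getElem_zip, hxeL, h2]
    have hzip : (L.zip L.tail).drop s = (x, L[s+1]'hs1) :: (L.zip L.tail).drop (s + 1) := by
      rw [List.drop_eq_getElem_cons hzlen, hzget]
    have hval : PySem.List.pyGetD L ((s : Int) + 1) "" = L[s+1]'hs1 := by
      have hc : ((s : Int) + 1) = ((s + 1 : Nat) : Int) := by push_cast; ring
      rw [hc, PySem.List.pyGetD_natCast]
      simp [List.getD, List.getElem?_eq_getElem hs1]
    rw [PySem.List.enumerate_cons, List.foldl_cons, hzip, List.foldl_cons]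
    simp only [hval]
    have hc : ((s : Int) + 1) = ((s + 1 : Nat) : Int) := by push_cast; ring
    rw [hc]
    simpa using ih (s + 1) hxs _

-- get? of an insert fold = last matching pair (as an option fold)
lemma get?_foldl_insert (ps : List (String × String)) :
    ∀ (d : PySem.Dict String String) (k : String),
    (ps.foldl (fun d p => d.insert p.1 p.2) d).get? k
      = ps.foldl (fun a p => if p.1 = k then some p.2 else a) (d.get? k) := by
  induction ps with
  | nil => intro d k; rfl
  | cons p ps ih =>
    intro d k
    rw [List.foldl_cons, List.foldl_cons, ih, PySem.Dict.get?_insert]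
    by_cases h : k = p.1
    · simp [h]
    · rw [if_neg h, if_neg (fun hh => h hh.symm)]

-- the pair fold of A's two-component state splits componentwise
lemma zipFold_components (ps : List (String × String)) :
    ∀ (a b : Option String),
    ps.foldl (fun st p =>
        (if p.1 = "namespaces" then some p.2 else st.1,
         if p.1 = "secrets" then some p.2 else st.2)) (a, b)
      = (ps.foldl (fun x p => if p.1 = "namespaces" then some p.2 else x) a,
         ps.foldl (fun x p => if p.1 = "secrets" then some p.2 else x) b) := by
  induction ps with
  | nil => intro a b; rfl
  | cons p ps ih => intro a b; rw [List.foldl_cons]; simp only [List.foldl_cons, ih]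

-- ===== VERDICT (by name: the statement is the Claim_ definition above) =====
theorem extract_ns_and_secret_py_spec : Claim_equal_extract_ns_and_secret_py := by
  intro path _
  unfold Spec_extract_ns_and_secret_py
  simp only [extract_ns_and_secret_py, extract_ns_and_secret_py_alt]
  set parts := partsOfPath path with hp
  have hA := aFold_eq_zipFold parts parts 0 (by simp) ((none : Option String), (none : Option String))
  have hB := bFold_eq_zipFold parts (PySem.List.slice parts none (some (-1))) 0
      (by rw [slice_neg_one]; simp) PySem.Dict.empty
  simp only [Nat.cast_zero, List.drop_zero] at hA hB
  rw [hA, hB, zipFold_components, get?_foldl_insert, get?_foldl_insert]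
  rfl
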